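-- pv_equiv track=rewrite | github.com/hamidhk/3PhaseMesh | all_func.py | nghbrs_verts_slwst
-- ===== SOURCE A (Python) =====
-- def nghbrs_verts_slwst(faces, numVerts):
--     # func. receives faces and nr. of verts
--     # returns indeces of neighbor verts for all verts
--     nghbrsMap = []
--     for i in range(numVerts):
--         nghbrs =[]
--         for face in faces:
--             if i in face:
--                 nghbrs += list(face)
--                 nghbrs.remove(i)
--         nghbrsMap.append(sorted(set(nghbrs)))
--         ''' nghbrsMap[j] is list of indices of verts
--             which are negibour with vertex j'''
--     return nghbrsMap
-- ===== SOURCE B (Python) =====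
-- def nghbrs_verts_slwst(faces, numVerts):
--     # Single pass over the faces: each occurrence of a vertex in a face gets the
--     # remaining entries of that face as neighbours; sort each set at the end.
--     adj = [set() for _ in range(numVerts)]
--     for face in faces:
--         for j, v in enumerate(face):
--             if 0 <= v < numVerts:
--                 adj[v].update(face[:j])
--                 adj[v].update(face[j+1:])
--     return [sorted(a) for a in adj]
-- ===== Notes on version B (the rewrite author's own statement) =====
-- stated objective: faster
-- what changed: Instead of scanning the whole face list once per vertex, B makes a single pass over the faces, giving each occurrence of a vertex the remaining entries of its face as neighbours, and sorts each per-vertex set at the end.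
import Mathlib
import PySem

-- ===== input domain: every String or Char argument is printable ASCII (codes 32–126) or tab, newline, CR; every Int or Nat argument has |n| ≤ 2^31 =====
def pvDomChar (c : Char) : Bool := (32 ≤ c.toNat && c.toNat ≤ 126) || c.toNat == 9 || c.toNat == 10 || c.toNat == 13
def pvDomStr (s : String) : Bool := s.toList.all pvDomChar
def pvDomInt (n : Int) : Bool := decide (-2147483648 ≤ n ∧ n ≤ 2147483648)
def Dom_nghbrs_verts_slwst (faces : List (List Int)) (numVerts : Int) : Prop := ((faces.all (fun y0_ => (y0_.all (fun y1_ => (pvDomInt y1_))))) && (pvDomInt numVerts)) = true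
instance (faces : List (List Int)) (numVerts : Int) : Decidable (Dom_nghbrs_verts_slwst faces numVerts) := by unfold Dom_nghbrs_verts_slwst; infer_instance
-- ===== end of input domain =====

-- B replaces A's per-vertex scan of all faces by a single pass over the faces that
-- gives each occurrence of a vertex the remaining face entries as neighbours; faster.


-- ===== PORT A =====
-- 'nghbrs.remove(i)' never raises here (the branch guarantees i ∈ face ⊆ nghbrs ++ face),
-- so the .getD default of remove? is unreachable — a totalization guard only.
def nghbrs_verts_slwst (faces : List (List Int)) (numVerts : Int) : List (List Int) :=
  (PySem.List.pyRange 0 numVerts 1).foldl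
    (fun nghbrsMap i =>
      let nghbrs := faces.foldl
        (fun nghbrs face =>
          if i ∈ face then (PySem.List.remove? (nghbrs ++ face) i).getD (nghbrs ++ face)
          else nghbrs) []
      nghbrsMap ++ [PySem.List.sorted (PySem.Set.ofList nghbrs) (fun x => x) false]) []

-- ===== PORT B =====
-- one face of Source B's loop: for j, v in enumerate(face): if 0 <= v < numVerts:
--   adj[v].update(face[:j]); adj[v].update(face[j+1:])
def pvFaceStep (numVerts : Int) (adj : List (PySem.Set Int)) (face : List Int) : List (PySem.Set Int) :=
  (PySem.List.enumerate face 0).foldl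
    (fun adj jv =>
      if 0 ≤ jv.2 ∧ jv.2 < numVerts then
        adj.modify jv.2.toNat (fun t =>
          PySem.Set.update (PySem.Set.update t (PySem.List.slice face none (some jv.1)))
            (PySem.List.slice face (some (jv.1 + 1)) none))
      else adj) adj

def nghbrs_verts_slwst_alt (faces : List (List Int)) (numVerts : Int) : List (List Int) :=
  let adj := faces.foldl (pvFaceStep numVerts) (List.replicate numVerts.toNat PySem.Set.empty)
  adj.map (fun a => PySem.List.sorted a (fun x => x) false)

-- ===== PRECONDITION & SPEC =====
def Spec_nghbrs_verts_slwst (faces : List (List Int)) (numVerts : Int) (out : List (List Int)) : Prop := out = nghbrs_verts_slwst_alt faces numVerts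
instance (faces : List (List Int)) (numVerts : Int) (out : List (List Int)) : Decidable (Spec_nghbrs_verts_slwst faces numVerts out) := by unfold Spec_nghbrs_verts_slwst; infer_instance

-- ===== CLAIM (what is proved, stated in full; the proofs are below) =====
def Claim_equal_nghbrs_verts_slwst : Prop := ∀ (faces : List (List Int)) (numVerts : Int), Dom_nghbrs_verts_slwst faces numVerts → Spec_nghbrs_verts_slwst faces numVerts (nghbrs_verts_slwst faces numVerts)

-- ===== LEMMAS AND PROOFS =====

-- ---- characterising A's inner accumulation ----
lemma pvStep_eq_erase (nghbrs face : List Int) (i : Int) (h : i ∈ face) :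
    (PySem.List.remove? (nghbrs ++ face) i).getD (nghbrs ++ face) = (nghbrs ++ face).erase i := by
  rw [PySem.List.remove?_eq_some_erase _ i (by simp [h])]; rfl

lemma pvCollect_mem_ne (faces : List (List Int)) (i v : Int) (hne : v ≠ i) :
    ∀ acc : List Int,
      (v ∈ faces.foldl
        (fun nghbrs face =>
          if i ∈ face then (PySem.List.remove? (nghbrs ++ face) i).getD (nghbrs ++ face)
          else nghbrs) acc
       ↔ v ∈ acc ∨ ∃ f ∈ faces, i ∈ f ∧ v ∈ f) := by
  induction faces with
  | nil => simp
  | cons f fs ih =>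
    intro acc
    simp only [List.foldl_cons]
    by_cases hf : i ∈ f
    · rw [if_pos hf, pvStep_eq_erase _ _ _ hf, ih]
      simp only [List.mem_erase_of_ne hne, List.mem_append, List.mem_cons]
      aesop
    · rw [if_neg hf, ih]
      simp only [List.exists_mem_cons_iff]
      aesop

lemma pvCollect_count (faces : List (List Int)) (i : Int) :
    ∀ acc : List Int,
      (faces.foldl
        (fun nghbrs face =>
          if i ∈ face then (PySem.List.remove? (nghbrs ++ face) i).getD (nghbrs ++ face)
          else nghbrs) acc).count i
      = acc.count i + (faces.map (fun f => if i ∈ f then f.count i - 1 else 0)).sum := by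
  induction faces with
  | nil => simp
  | cons f fs ih =>
    intro acc
    simp only [List.foldl_cons, List.map_cons, List.sum_cons]
    by_cases hf : i ∈ f
    · rw [if_pos hf, pvStep_eq_erase _ _ _ hf, ih, if_pos hf, List.count_erase_self,
        List.count_append]
      have h1 : 0 < f.count i := List.count_pos_iff.mpr hf
      omega
    · rw [if_neg hf, ih, if_neg hf]
      omega

def pvCollect (faces : List (List Int)) (i : Int) : List Int :=
  faces.foldl
    (fun nghbrs face =>
      if i ∈ face then (PySem.List.remove? (nghbrs ++ face) i).getD (nghbrs ++ face)
      else nghbrs) []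

lemma pvSum_pos_iff (faces : List (List Int)) (v : Int) :
    (0 < (faces.map (fun f => if v ∈ f then f.count v - 1 else 0)).sum
     ↔ ∃ f ∈ faces, v ∈ f ∧ 2 ≤ f.count v) := by
  induction faces with
  | nil => simp
  | cons f fs ih =>
    simp only [List.map_cons, List.sum_cons, List.exists_mem_cons_iff]
    by_cases hf : v ∈ f
    · have h2 : 0 < f.count v := List.count_pos_iff.mpr hf
      rw [if_pos hf]
      constructor
      · intro h; rcases Nat.lt_or_ge (f.count v) 2 with h3 | h3
        · right; rw [← ih]; omega
        · exact Or.inl ⟨hf, h3⟩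
      · rintro (⟨_, h3⟩ | h3)
        · omega
        · rw [← ih] at h3; omega
    · rw [if_neg hf]
      simp only [Nat.zero_add, ih]
      constructor
      · exact Or.inr
      · rintro (⟨h2, _⟩ | h)
        · exact absurd h2 hf
        · exact h

lemma pvCollect_mem (faces : List (List Int)) (i v : Int) :
    v ∈ pvCollect faces i ↔ ∃ f ∈ faces, i ∈ f ∧ v ∈ f ∧ (v ≠ i ∨ 2 ≤ f.count i) := by
  by_cases hne : v = i
  · subst hne
    rw [← List.count_pos_iff, pvCollect, pvCollect_count]
    simp only [List.count_nil, Nat.zero_add]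
    rw [pvSum_pos_iff]
    constructor
    · rintro ⟨f, hf, hv, h2⟩; exact ⟨f, hf, hv, hv, Or.inr h2⟩
    · rintro ⟨f, hf, hi, hv, h⟩
      rcases h with h | h
      · exact absurd rfl h
      · exact ⟨f, hf, hi, h⟩
  · rw [pvCollect, pvCollect_mem_ne faces i v hne]
    simp only [List.not_mem_nil, false_or]
    constructor
    · rintro ⟨f, hf, hi, hv⟩; exact ⟨f, hf, hi, hv, Or.inl hne⟩
    · rintro ⟨f, hf, hi, hv, _⟩; exact ⟨f, hf, hi, hv⟩

-- ---- B's per-face update: length preservation, nodup, membership ----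
lemma pvInner_length (numVerts : Int) (face : List Int) (l : List (Int × Int)) :
    ∀ adj : List (PySem.Set Int),
      (l.foldl
        (fun adj jv =>
          if 0 ≤ jv.2 ∧ jv.2 < numVerts then
            adj.modify jv.2.toNat (fun t =>
              PySem.Set.update (PySem.Set.update t (PySem.List.slice face none (some jv.1)))
                (PySem.List.slice face (some (jv.1 + 1)) none))
          else adj) adj).length = adj.length := by
  induction l with
  | nil => intro adj; rfl
  | cons v l ih =>
    intro adj
    simp only [List.foldl_cons]
    rw [ih]
    split
    · exact List.length_modify _ _ _
    · rfl

lemma pvFaceStep_length (numVerts : Int) (adj : List (PySem.Set Int)) (face : List Int) :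
    (pvFaceStep numVerts adj face).length = adj.length := pvInner_length numVerts face _ adj

lemma pvFoldB_length (faces : List (List Int)) (numVerts : Int) (adj : List (PySem.Set Int)) :
    (faces.foldl (pvFaceStep numVerts) adj).length = adj.length := by
  induction faces generalizing adj with
  | nil => rfl
  | cons f fs ih => rw [List.foldl_cons, ih, pvFaceStep_length]

lemma pvMem_modify {α : Type} (l : List α) (i : Nat) (f : α → α) :
    ∀ t ∈ l.modify i f, t ∈ l ∨ ∃ u ∈ l, t = f u := by
  intro t ht
  rw [List.mem_iff_getElem] at ht
  obtain ⟨j, hj, rfl⟩ := ht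
  have hj' : j < l.length := by simpa using hj
  rw [List.getElem_modify]
  split
  · exact Or.inr ⟨l[j], List.getElem_mem hj', rfl⟩
  · exact Or.inl (List.getElem_mem hj')

lemma pvInner_nodup (numVerts : Int) (face : List Int) (l : List (Int × Int)) :
    ∀ adj : List (PySem.Set Int), (∀ t ∈ adj, List.Nodup t) →
      ∀ t ∈ (l.foldl
        (fun adj jv =>
          if 0 ≤ jv.2 ∧ jv.2 < numVerts then
            adj.modify jv.2.toNat (fun t =>
              PySem.Set.update (PySem.Set.update t (PySem.List.slice face none (some jv.1)))
                (PySem.List.slice face (some (jv.1 + 1)) none))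
          else adj) adj), List.Nodup t := by
  induction l with
  | nil => exact fun adj h => h
  | cons v l ih =>
    intro adj h
    simp only [List.foldl_cons]
    apply ih
    split
    · intro t ht
      rcases pvMem_modify _ _ _ t ht with h1 | ⟨u, hu, rfl⟩
      · exact h t h1
      · exact PySem.Set.nodup_update _ _ (PySem.Set.nodup_update _ _ (h u hu))
    · exact h

lemma pvFoldB_nodup (faces : List (List Int)) (numVerts : Int) (adj : List (PySem.Set Int))
    (h : ∀ t ∈ adj, List.Nodup t) : ∀ t ∈ faces.foldl (pvFaceStep numVerts) adj, List.Nodup t := by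
  induction faces generalizing adj with
  | nil => exact h
  | cons f fs ih =>
    rw [List.foldl_cons]
    exact ih _ (pvInner_nodup numVerts f _ adj h)

lemma pvGetD_modify {α : Type} (l : List α) (i k : Nat) (f : α → α) (d : α) (hk : k < l.length) :
    (l.modify i f).getD k d = if i = k then f (l.getD k d) else l.getD k d := by
  rw [List.getD_eq_getElem _ _ (show k < (l.modify i f).length by rw [List.length_modify]; exact hk),
      List.getElem_modify, List.getD_eq_getElem _ _ hk]

lemma pvInner_mem (numVerts : Int) (face : List Int) (l : List (Int × Int)) :
    ∀ (adj : List (PySem.Set Int)) (k : Nat), k < adj.length → ∀ (y : Int),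
      (y ∈ (l.foldl
        (fun adj jv =>
          if 0 ≤ jv.2 ∧ jv.2 < numVerts then
            adj.modify jv.2.toNat (fun t =>
              PySem.Set.update (PySem.Set.update t (PySem.List.slice face none (some jv.1)))
                (PySem.List.slice face (some (jv.1 + 1)) none))
          else adj) adj).getD k []
       ↔ y ∈ adj.getD k [] ∨ ∃ p ∈ l, 0 ≤ p.2 ∧ p.2 < numVerts ∧ p.2.toNat = k ∧
           (y ∈ PySem.List.slice face none (some p.1) ∨
            y ∈ PySem.List.slice face (some (p.1 + 1)) none)) := by
  induction l with
  | nil => simp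
  | cons v l ih =>
    intro adj k hk y
    simp only [List.foldl_cons]
    by_cases hr : 0 ≤ v.2 ∧ v.2 < numVerts
    · rw [if_pos hr]
      have hk2 : k < (adj.modify v.2.toNat (fun t =>
          PySem.Set.update (PySem.Set.update t (PySem.List.slice face none (some v.1)))
            (PySem.List.slice face (some (v.1 + 1)) none))).length := by
        rw [List.length_modify]; exact hk
      rw [ih _ k hk2 y, pvGetD_modify _ _ _ _ _ hk]
      by_cases hv : v.2.toNat = k
      · rw [if_pos hv]
        constructor
        · rintro (h | h)
          · rcases (PySem.Set.mem_update _ _ _).mp h with h | h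
            · rcases (PySem.Set.mem_update _ _ _).mp h with h | h
              · exact Or.inl h
              · exact Or.inr ⟨v, List.mem_cons_self, hr.1, hr.2, hv, Or.inl h⟩
            · exact Or.inr ⟨v, List.mem_cons_self, hr.1, hr.2, hv, Or.inr h⟩
          · rcases h with ⟨w, hw, h⟩
            exact Or.inr ⟨w, List.mem_cons_of_mem _ hw, h⟩
        · rintro (h | ⟨w, hw, hw0, hwn, hwk, hmem⟩)
          · exact Or.inl ((PySem.Set.mem_update _ _ _).mpr
              (Or.inl ((PySem.Set.mem_update _ _ _).mpr (Or.inl h))))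
          · rcases List.mem_cons.mp hw with rfl | hw'
            · left
              rcases hmem with h | h
              · exact (PySem.Set.mem_update _ _ _).mpr
                  (Or.inl ((PySem.Set.mem_update _ _ _).mpr (Or.inr h)))
              · exact (PySem.Set.mem_update _ _ _).mpr (Or.inr h)
            · exact Or.inr ⟨w, hw', hw0, hwn, hwk, hmem⟩
      · rw [if_neg hv]
        constructor
        · rintro (h | ⟨w, hw, h⟩)
          · exact Or.inl h
          · exact Or.inr ⟨w, List.mem_cons_of_mem _ hw, h⟩
        · rintro (h | ⟨w, hw, hw0, hwn, hwk, hmem⟩)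
          · exact Or.inl h
          · rcases List.mem_cons.mp hw with rfl | hw'
            · exact absurd hwk hv
            · exact Or.inr ⟨w, hw', hw0, hwn, hwk, hmem⟩
    · rw [if_neg hr]
      rw [ih _ k hk y]
      constructor
      · rintro (h | ⟨w, hw, h⟩)
        · exact Or.inl h
        · exact Or.inr ⟨w, List.mem_cons_of_mem _ hw, h⟩
      · rintro (h | ⟨w, hw, hw0, hwn, hwk, hmem⟩)
        · exact Or.inl h
        · rcases List.mem_cons.mp hw with rfl | hw'
          · exact absurd ⟨hw0, hwn⟩ hr
          · exact Or.inr ⟨w, hw', hw0, hwn, hwk, hmem⟩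

-- a vertex at position j with y among the other entries ⟺ shared face membership
-- (with y = k exactly when k occurs at least twice in the face)
lemma pvPositions_iff (face : List Int) (k : Nat) (y : Int) :
    (∃ j : Nat, ∃ hj : j < face.length, face[j] = (k : Int) ∧
        (y ∈ face.take j ∨ y ∈ face.drop (j + 1)))
    ↔ (k : Int) ∈ face ∧ y ∈ face ∧ (y ≠ (k : Int) ∨ 2 ≤ face.count (k : Int)) := by
  constructor
  · rintro ⟨j, hj, hfj, hy⟩
    have hkmem : (k : Int) ∈ face := hfj ▸ List.getElem_mem hj
    have hymem : y ∈ face := by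
      rcases hy with h | h
      · exact List.mem_of_mem_take h
      · exact List.mem_of_mem_drop h
    refine ⟨hkmem, hymem, ?_⟩
    by_cases hyk : y = (k : Int)
    · subst hyk
      right
      have hsplit : face = face.take j ++ (k : Int) :: face.drop (j + 1) := by
        conv_lhs => rw [← List.take_append_drop j face]
        rw [← List.getElem_cons_drop hj, hfj]
      rw [hsplit, List.count_append, List.count_cons_self]
      rcases hy with h | h
      · have := List.count_pos_iff.mpr h; omega
      · have := List.count_pos_iff.mpr h; omega
    · exact Or.inl hyk
  · rintro ⟨hk, hy, hcond⟩
    obtain ⟨j, hj, hfj⟩ := List.getElem_of_mem hk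
    refine ⟨j, hj, hfj, ?_⟩
    have hsplit : face = face.take j ++ (k : Int) :: face.drop (j + 1) := by
      conv_lhs => rw [← List.take_append_drop j face]
      rw [← List.getElem_cons_drop hj, hfj]
    by_cases hyk : y = (k : Int)
    · subst hyk
      rcases hcond with h | h
      · exact absurd rfl h
      · rw [hsplit, List.count_append, List.count_cons_self] at h
        rcases Nat.lt_or_ge 0 (List.count ((k : Int)) (face.take j)) with hc | hc
        · exact Or.inl (List.count_pos_iff.mp hc)
        · have : 0 < List.count ((k : Int)) (face.drop (j + 1)) := by omega
          exact Or.inr (List.count_pos_iff.mp this)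
    · rw [hsplit] at hy
      rcases List.mem_append.mp hy with h | h
      · exact Or.inl h
      · rcases List.mem_cons.mp h with h | h
        · exact absurd h hyk
        · exact Or.inr h

lemma pvFaceStep_mem (numVerts : Int) (adj : List (PySem.Set Int)) (face : List Int)
    (k : Nat) (hk : k < adj.length) (y : Int) :
    (y ∈ (pvFaceStep numVerts adj face).getD k []
     ↔ y ∈ adj.getD k [] ∨ ((k : Int) ∈ face ∧ (k : Int) < numVerts ∧ y ∈ face ∧ (y ≠ (k : Int) ∨ 2 ≤ face.count (k : Int)))) := by
  rw [pvFaceStep, pvInner_mem numVerts face _ adj k hk y]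
  have hiff : (∃ p ∈ PySem.List.enumerate face 0, 0 ≤ p.2 ∧ p.2 < numVerts ∧ p.2.toNat = k ∧
      (y ∈ PySem.List.slice face none (some p.1) ∨
       y ∈ PySem.List.slice face (some (p.1 + 1)) none))
      ↔ ((k : Int) ∈ face ∧ (k : Int) < numVerts ∧ y ∈ face ∧ (y ≠ (k : Int) ∨ 2 ≤ face.count (k : Int))) := by
    constructor
    · rintro ⟨p, hp, hp0, hpn, hpk, hmem⟩
      obtain ⟨j, hj, rfl⟩ := (PySem.List.mem_enumerate_iff _ _ _).mp hp
      simp only [Int.zero_add] at hp0 hpn hpk hmem ⊢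
      have hkj : face[j] = (k : Int) := by
        have : face[j] = ((face[j].toNat : Nat) : Int) := by omega
        rw [this, hpk]
      rw [show ((j : Int) + 1) = ((j + 1 : Nat) : Int) by push_cast; ring,
          PySem.List.slice_to_natCast, PySem.List.slice_from_natCast] at hmem
      have := (pvPositions_iff face k y).mp ⟨j, hj, hkj, hmem⟩
      exact ⟨this.1, hkj ▸ hpn, this.2⟩
    · rintro ⟨hkf, hkn, hyf, hcond⟩
      obtain ⟨j, hj, hfj, hmem⟩ := (pvPositions_iff face k y).mpr ⟨hkf, hyf, hcond⟩
      refine ⟨((j : Int), face[j]), (PySem.List.mem_enumerate_iff _ _ _).mpr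
        ⟨j, hj, by simp⟩, ?_⟩
      rw [hfj]
      refine ⟨Int.natCast_nonneg k, hkn, Int.toNat_natCast k, ?_⟩
      dsimp only
      rw [show ((j : Int) + 1) = ((j + 1 : Nat) : Int) by push_cast; ring,
          PySem.List.slice_to_natCast, PySem.List.slice_from_natCast]
      exact hmem
  rw [hiff]

lemma pvFoldB_mem (faces : List (List Int)) (numVerts : Int) :
    ∀ (adj : List (PySem.Set Int)) (k : Nat), k < adj.length → ∀ (y : Int),
    (y ∈ (faces.foldl (pvFaceStep numVerts) adj).getD k []
     ↔ y ∈ adj.getD k [] ∨ ∃ f ∈ faces, (k : Int) ∈ f ∧ (k : Int) < numVerts ∧ y ∈ f ∧ (y ≠ (k : Int) ∨ 2 ≤ f.count (k : Int))) := by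
  induction faces with
  | nil => simp
  | cons f fs ih =>
    intro adj k hk y
    rw [List.foldl_cons, ih _ k (by rw [pvFaceStep_length]; exact hk) y,
        pvFaceStep_mem numVerts adj f k hk y]
    simp only [List.exists_mem_cons_iff]
    exact or_assoc

-- ===== main assembly =====
lemma pvA_eq_map (faces : List (List Int)) (numVerts : Int) :
    nghbrs_verts_slwst faces numVerts
      = (PySem.List.pyRange 0 numVerts 1).map
          (fun i => PySem.List.sorted (PySem.Set.ofList (pvCollect faces i)) (fun x => x) false) := by
  unfold nghbrs_verts_slwst pvCollect
  rw [PySem.List.foldl_append_singleton_eq_map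
    (f := fun i => PySem.List.sorted (PySem.Set.ofList
      (faces.foldl (fun nghbrs face =>
        if i ∈ face then (PySem.List.remove? (nghbrs ++ face) i).getD (nghbrs ++ face)
        else nghbrs) [])) (fun x => x) false)]
  rfl

-- ===== VERDICT (by name: the statement is the Claim_ definition above) =====
theorem nghbrs_verts_slwst_spec : Claim_equal_nghbrs_verts_slwst := by
  intro faces numVerts _
  unfold Spec_nghbrs_verts_slwst nghbrs_verts_slwst_alt
  rw [pvA_eq_map]
  set adj0 : List (PySem.Set Int) := List.replicate numVerts.toNat PySem.Set.empty with hadj0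
  set adjF := faces.foldl (pvFaceStep numVerts) adj0 with hadjF
  have hlenF : adjF.length = numVerts.toNat := by
    rw [hadjF, pvFoldB_length, hadj0, List.length_replicate]
  apply List.ext_getElem
  · simp [PySem.List.length_pyRange_one, hlenF]
  · intro k hk1 hk2
    have hkn : k < numVerts.toNat := by
      simpa [PySem.List.length_pyRange_one] using hk1
    have hkF : k < adjF.length := by rw [hlenF]; exact hkn
    simp only [List.getElem_map, PySem.List.getElem_pyRange_one]
    rw [Int.zero_add]
    apply PySem.List.sorted_eq_sorted_of_perm _ _ _ (fun a b h => h)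
    rw [List.perm_ext_iff_of_nodup (PySem.Set.nodup_ofList _) ?nd]
    case nd =>
      exact pvFoldB_nodup faces numVerts adj0
        (fun t ht => by rw [List.eq_of_mem_replicate ht]; exact List.nodup_nil) _
        (List.getElem_mem hkF)
    intro y
    rw [PySem.Set.mem_ofList, pvCollect_mem,
        ← List.getD_eq_getElem adjF [] hkF,
        pvFoldB_mem faces numVerts adj0 k (by rw [hadj0, List.length_replicate]; exact hkn) y]
    have hzero : adj0.getD k [] = [] := by
      rw [hadj0, List.getD_eq_getElem _ _ (by simpa using hkn)]
      simp [List.getElem_replicate]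
    rw [hzero]
    have hklt : (k : Int) < numVerts := by omega
    simp only [List.not_mem_nil, false_or]
    constructor
    · rintro ⟨f, hf, h1, h2, h3⟩; exact ⟨f, hf, h1, hklt, h2, h3⟩
    · rintro ⟨f, hf, h1, _, h2, h3⟩; exact ⟨f, hf, h1, h2, h3⟩
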